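-- pv_equiv track=rewrite | github.com/edemuner/Python-freecodecamp | time_calculator/time_calculator/time_calculator.py | minutes_incrementer
-- ===== SOURCE A (Python) =====
-- def minutes_incrementer(v1, v2):
--     hour = 0
--     minute = v1
--     for i in range(v2):
--         if minute == 59:
--             minute = 0
--             hour += 1
--             continue
--         minute += 1
--     return [hour, minute]
-- ===== SOURCE B (Python) =====
-- def minutes_incrementer(v1, v2):
--     steps = max(v2, 0)
--     first = 59 - v1  # step count after which the hand first sits on 59
--     if 0 <= first <= steps - 1:
--         rollovers = (steps - 1 - first) // 60 + 1
--     else: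
--         rollovers = 0
--     return [rollovers, v1 + steps - 60 * rollovers]
-- ===== Notes on version B (the rewrite author's own statement) =====
-- stated objective: faster
-- what changed: Replaced the per-minute simulation loop with closed-form arithmetic: compute the step at which the minute hand first sits on 59, count the rollovers from there (one every 60 steps), and derive the final minute by subtraction.
import Mathlib
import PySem

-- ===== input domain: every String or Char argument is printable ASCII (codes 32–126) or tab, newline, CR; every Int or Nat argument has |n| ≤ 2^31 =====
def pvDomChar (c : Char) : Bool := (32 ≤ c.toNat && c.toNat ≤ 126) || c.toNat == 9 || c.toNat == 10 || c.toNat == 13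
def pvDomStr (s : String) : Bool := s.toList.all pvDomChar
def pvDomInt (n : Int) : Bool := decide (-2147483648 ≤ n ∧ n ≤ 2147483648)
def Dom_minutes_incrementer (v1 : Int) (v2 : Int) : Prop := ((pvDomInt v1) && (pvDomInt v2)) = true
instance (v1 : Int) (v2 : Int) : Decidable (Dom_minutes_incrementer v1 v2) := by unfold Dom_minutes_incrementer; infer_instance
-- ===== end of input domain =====

-- B replaces A's per-minute simulation loop with closed-form arithmetic counting when the minute hand sits on 59 (constant-time vs O(v2)); equal to A on all inputs.


-- ===== PORT A =====
def minutes_incrementer (v1 : Int) (v2 : Int) : List Int :=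
  let st := (PySem.List.pyRange 0 v2 1).foldl
    (fun (s : Int × Int) _ => if s.2 = 59 then (s.1 + 1, 0) else (s.1, s.2 + 1))
    (0, v1)
  [st.1, st.2]

-- ===== PORT B =====
def minutes_incrementer_alt (v1 : Int) (v2 : Int) : List Int :=
  let steps : Int := max v2 0
  let first : Int := 59 - v1
  let rollovers : Int :=
    if 0 ≤ first ∧ first ≤ steps - 1 then PySem.Int.floordiv (steps - 1 - first) 60 + 1 else 0
  [rollovers, v1 + steps - 60 * rollovers]

-- ===== PRECONDITION & SPEC =====
def Spec_minutes_incrementer (v1 : Int) (v2 : Int) (out : List Int) : Prop := out = minutes_incrementer_alt v1 v2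
instance (v1 : Int) (v2 : Int) (out : List Int) : Decidable (Spec_minutes_incrementer v1 v2 out) := by unfold Spec_minutes_incrementer; infer_instance

-- ===== CLAIM (what is proved, stated in full; the proofs are below) =====
def Claim_equal_minutes_incrementer : Prop := ∀ (v1 : Int) (v2 : Int), Dom_minutes_incrementer v1 v2 → Spec_minutes_incrementer v1 v2 (minutes_incrementer v1 v2)

-- ===== LEMMAS AND PROOFS =====

-- the loop state transformer of A, indexed by the number of remaining iterations
def pvLoopA : Nat → Int × Int → Int × Int
  | 0, s => s
  | n + 1, s => pvLoopA n (if s.2 = 59 then (s.1 + 1, 0) else (s.1, s.2 + 1))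

lemma foldl_eq_pvLoopA (l : List Int) (s : Int × Int) :
    l.foldl (fun (s : Int × Int) _ => if s.2 = 59 then (s.1 + 1, 0) else (s.1, s.2 + 1)) s
      = pvLoopA l.length s := by
  induction l generalizing s with
  | nil => rfl
  | cons a t ih => simp [List.foldl, pvLoopA, ih]

-- a starting minute above 59 never triggers the reset branch
lemma pvLoopA_high (n : Nat) : ∀ (h m : Int), 59 < m → pvLoopA n (h, m) = (h, m + n) := by
  induction n with
  | zero => intro h m _; simp [pvLoopA]
  | succ k ih =>
    intro h m hm
    show pvLoopA k (if m = 59 then (h + 1, 0) else (h, m + 1)) = _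
    rw [if_neg (by omega)]
    rw [ih h (m + 1) (by omega)]
    push_cast
    simp only [Prod.mk.injEq]
    exact ⟨trivial, by omega⟩

-- closed form of A's loop when the starting minute is at most 59
lemma pvLoopA_low (n : Nat) : ∀ (h m : Int), m ≤ 59 →
    pvLoopA n (h, m) =
      if m + n ≤ 59 then (h, m + n)
      else (h + (m + n - 60) / 60 + 1, (m + n - 60) % 60) := by
  induction n with
  | zero =>
    intro h m h59
    simp only [pvLoopA, Nat.cast_zero, add_zero]
    rw [if_pos h59]
  | succ k ih =>
    intro h m h59
    show pvLoopA k (if m = 59 then (h + 1, 0) else (h, m + 1)) = _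
    by_cases hm : m = 59
    · rw [if_pos hm]; subst hm
      rw [ih (h + 1) 0 (by omega)]
      push_cast
      split_ifs <;> rw [Prod.mk.injEq] <;> constructor <;> omega
    · rw [if_neg hm]
      rw [ih h (m + 1) (by omega)]
      push_cast
      split_ifs <;> rw [Prod.mk.injEq] <;> constructor <;> omega

-- ===== VERDICT (by name: the statement is the Claim_ definition above) =====
theorem minutes_incrementer_spec : Claim_equal_minutes_incrementer := by
  intro v1 v2 _
  unfold Spec_minutes_incrementer minutes_incrementer minutes_incrementer_alt
  rw [foldl_eq_pvLoopA, PySem.List.length_pyRange_one]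
  have hn : ((v2 - 0).toNat : Int) = max v2 0 := by omega
  simp only [PySem.Int.floordiv_eq_ediv_of_pos (show (0:Int) < 60 by norm_num)]
  by_cases hv : v1 ≤ 59
  · rw [pvLoopA_low _ _ _ hv, hn]
    split_ifs <;> simp_all <;> omega
  · rw [pvLoopA_high _ _ _ (by omega), hn]
    split_ifs <;> simp_all <;> omega
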